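-- pv_equiv track=rewrite | github.com/Raagam-Parmar/Event_Mapper | buttons.py | modify_label_string
-- ===== SOURCE A (Python) =====
-- def modify_label_string(string, k, substring):
--     # Adds substring after every k characters
--     output_string = ""
--     index_counter = 0
--     while len(string[index_counter:]) >= k:
--         output_string += string[index_counter:index_counter+k] + substring
--         index_counter += k
--     output_string += string[index_counter:]
--     return output_string
-- ===== SOURCE B (Python) =====
-- def modify_label_string(string, k, substring):
--     # Adds substring after every k characters: single streaming pass over the
--     # characters with a modular counter, no slicing and no chunk list.
--     pieces = []
--     count = 0
--     for ch in string:
--         pieces.append(ch)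
--         count += 1
--         if count == k:
--             pieces.append(substring)
--             count = 0
--     return "".join(pieces)
-- ===== Notes on version B (the rewrite author's own statement) =====
-- stated objective: alternative
-- what changed: Replaces A's while-loop that repeatedly re-slices the remaining tail and concatenates k-sized chunks with a single character-level streaming pass keeping a modular counter that emits the separator whenever the counter reaches k (no slicing, no chunk list, no trailing fix-up), joined once at the end.
import Mathlib
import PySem

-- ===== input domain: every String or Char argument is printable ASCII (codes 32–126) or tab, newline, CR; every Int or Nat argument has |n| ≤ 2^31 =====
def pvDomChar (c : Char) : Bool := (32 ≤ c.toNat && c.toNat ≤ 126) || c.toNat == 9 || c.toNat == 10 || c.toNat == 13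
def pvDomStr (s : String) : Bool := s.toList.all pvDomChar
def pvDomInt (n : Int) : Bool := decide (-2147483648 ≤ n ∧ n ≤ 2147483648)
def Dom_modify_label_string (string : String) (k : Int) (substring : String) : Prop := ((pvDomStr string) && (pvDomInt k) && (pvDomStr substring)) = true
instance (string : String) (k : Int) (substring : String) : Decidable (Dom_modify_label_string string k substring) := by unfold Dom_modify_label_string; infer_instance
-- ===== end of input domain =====

-- B replaces A's tail-re-slicing while-loop over k-chunks with a single character-level
-- streaming pass keeping a modular counter; proved equal for every k ≥ 1 (A loops forever otherwise).


-- ===== PORT A =====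
-- A's while-loop; the fuel argument is only a totality guard (never exhausted when 1 ≤ k,
-- since each iteration advances index_counter by k ≥ 1; for k ≤ 0 Python A loops forever).
def pvALoop (s sub : List Char) (k : Int) : Nat → Int → List Char → List Char
  | 0, _, acc => acc
  | fuel + 1, i, acc =>
      if k ≤ ((PySem.List.slice s (some i) none).length : Int) then
        pvALoop s sub k fuel (i + k) (acc ++ PySem.List.slice s (some i) (some (i + k)) ++ sub)
      else
        acc ++ PySem.List.slice s (some i) none

def modify_label_string (string : String) (k : Int) (substring : String) : String :=
  String.ofList (pvALoop string.toList substring.toList k (string.toList.length + 1) 0 [])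

-- ===== PORT B =====
-- Source B's for-loop over the characters: state = (pieces so far, count), one fold.
def modify_label_string_alt (string : String) (k : Int) (substring : String) : String :=
  String.ofList (string.toList.foldl
    (fun (st : List Char × Int) ch =>
      let pieces := st.1 ++ [ch]
      let count := st.2 + 1
      if count = k then (pieces ++ substring.toList, 0) else (pieces, count))
    ([], 0)).1

-- ===== PRECONDITION & SPEC =====
-- Pre_ excludes only k ≤ 0, where Python A never returns (infinite loop: the remaining-tail
-- length is always ≥ k when k ≤ 0).
def Pre_modify_label_string (string : String) (k : Int) (substring : String) : Prop := 1 ≤ k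
instance (string : String) (k : Int) (substring : String) : Decidable (Pre_modify_label_string string k substring) := by unfold Pre_modify_label_string; infer_instance
def pvWitness_modify_label_string : String × Int × String := ("abcde", 2, "--")

def Spec_modify_label_string (string : String) (k : Int) (substring : String) (out : String) : Prop := out = modify_label_string_alt string k substring
instance (string : String) (k : Int) (substring : String) (out : String) : Decidable (Spec_modify_label_string string k substring out) := by unfold Spec_modify_label_string; infer_instance

-- ===== CLAIM (what is proved, stated in full; the proofs are below) =====
def Claim_equal_modify_label_string : Prop := ∀ (string : String) (k : Int) (substring : String), Dom_modify_label_string string k substring → Pre_modify_label_string string k substring → Spec_modify_label_string string k substring (modify_label_string string k substring)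

-- ===== LEMMAS AND PROOFS =====

-- Reference function: A's loop seen from the remaining tail; step size km+1 ≥ 1.
def pvARef (km : Nat) (sub : List Char) (s : List Char) : List Char :=
  if s.length < km + 1 then s
  else s.take (km + 1) ++ sub ++ pvARef km sub (s.drop (km + 1))
termination_by s.length
decreasing_by simp; omega

lemma pvARef_small {km : Nat} {sub s : List Char} (h : s.length < km + 1) :
    pvARef km sub s = s := by rw [pvARef]; simp [h]

lemma pvARef_step {km : Nat} {sub s : List Char} (h : km + 1 ≤ s.length) :
    pvARef km sub s = s.take (km + 1) ++ sub ++ pvARef km sub (s.drop (km + 1)) := by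
  rw [pvARef]; simp [Nat.not_lt.mpr h]

-- A-side: the fueled loop from index i computes pvARef of the remaining tail.
lemma pvALoop_eq (s sub : List Char) (k : Int) (hk : 1 ≤ k) :
    ∀ (fuel : Nat) (i : Nat) (acc : List Char), s.length - i < fuel →
      pvALoop s sub k fuel (i : Int) acc = acc ++ pvARef (k.toNat - 1) sub (s.drop i) := by
  intro fuel
  induction fuel with
  | zero => intro i acc h; omega
  | succ fuel ih =>
    intro i acc h
    rw [pvALoop]
    rw [PySem.List.slice_from_natCast]
    by_cases hc : k ≤ ((s.drop i).length : Int)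
    · have hlen : (k.toNat - 1) + 1 ≤ (s.drop i).length := by
        simp only [List.length_drop] at hc ⊢; omega
      rw [if_pos hc]
      have hik : (i : Int) + k = ((i + ((k.toNat - 1) + 1) : Nat) : Int) := by push_cast; omega
      have hslice : PySem.List.slice s (some (i : Int)) (some ((i : Int) + k))
          = (s.drop i).take ((k.toNat - 1) + 1) := by
        rw [hik]
        have : ((i + ((k.toNat - 1) + 1) : Nat) : Int)
            = (i : Int) + (((k.toNat - 1) + 1 : Nat) : Int) := by push_cast; ring
        rw [this, PySem.List.slice_natCast_add]
      rw [hslice, hik, ih (i + ((k.toNat - 1) + 1)) _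
        (by simp only [List.length_drop] at hlen ⊢; omega)]
      rw [pvARef_step hlen]
      simp [List.drop_drop, List.append_assoc, Nat.add_comm]
    · have hlen : (s.drop i).length < (k.toNat - 1) + 1 := by
        simp only [List.length_drop] at hc ⊢; omega
      rw [if_neg hc, pvARef_small hlen]

-- B-side reference: the streaming pass, with the running count as explicit argument.
def pvBRef (k : Int) (sub : List Char) : List Char → Int → List Char
  | [], _ => []
  | ch :: t, c =>
      if c + 1 = k then ch :: (sub ++ pvBRef k sub t 0)
      else ch :: pvBRef k sub t (c + 1)

-- The fold of the port accumulates exactly pvBRef of the remaining characters.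
lemma pvFold_eq (k : Int) (sub : List Char) :
    ∀ (t : List Char) (acc : List Char) (c : Int),
      (t.foldl (fun (st : List Char × Int) ch =>
          let pieces := st.1 ++ [ch]
          let count := st.2 + 1
          if count = k then (pieces ++ sub, 0) else (pieces, count)) (acc, c)).1
      = acc ++ pvBRef k sub t c := by
  intro t
  induction t with
  | nil => intro acc c; simp [pvBRef]
  | cons ch t ih =>
    intro acc c
    simp only [List.foldl_cons, pvBRef]
    by_cases hc : c + 1 = k
    · simp only [hc, ih]
      simp
    · simp only [if_neg hc, ih]
      simp

-- The streaming pass with count c agrees with A's chunking view: it first copies the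
-- k - c characters still owed to the current chunk, then behaves like pvARef.
lemma pvBRef_eq (k : Int) (hk : 1 ≤ k) (sub : List Char) :
    ∀ (t : List Char) (c : Int), 0 ≤ c → c < k →
      pvBRef k sub t c
        = t.take (k - c).toNat ++
          (if (k - c).toNat ≤ t.length then sub ++ pvARef (k.toNat - 1) sub (t.drop (k - c).toNat)
           else []) := by
  intro t
  induction t with
  | nil =>
    intro c h0 hck
    have hn : ¬ (k - c).toNat ≤ ([] : List Char).length := by simp; omega
    rw [show pvBRef k sub [] c = [] from rfl, if_neg hn]
    simp
  | cons ch t ih =>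
    intro c h0 hck
    rw [pvBRef]
    by_cases hc : c + 1 = k
    · rw [if_pos hc]
      have h1 : (k - c).toNat = 1 := by omega
      have hle : (k - c).toNat ≤ (ch :: t).length := by simp [h1]
      rw [h1, if_pos (h1 ▸ hle)]
      have hrec : pvBRef k sub t 0 = pvARef (k.toNat - 1) sub t := by
        rw [ih 0 le_rfl (by omega)]
        simp only [Int.sub_zero]
        by_cases hl : k.toNat ≤ t.length
        · rw [if_pos (by omega : (k).toNat ≤ t.length)]
          rw [pvARef_step (by omega : (k.toNat - 1) + 1 ≤ t.length)]
          have : (k.toNat - 1) + 1 = k.toNat := by omega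
          rw [this]
          simp [List.append_assoc]
        · rw [if_neg (by omega : ¬ (k).toNat ≤ t.length), List.append_nil,
            List.take_of_length_le (by omega), pvARef_small (by omega)]
      simp [hrec]
    · rw [if_neg hc]
      have hck1 : c + 1 < k := by omega
      rw [ih (c + 1) (by omega) hck1]
      have hm : (k - c).toNat = (k - (c + 1)).toNat + 1 := by omega
      rw [hm]
      simp only [List.take_succ_cons, List.drop_succ_cons, List.length_cons]
      rw [if_congr (by omega : (k - (c+1)).toNat ≤ t.length ↔ (k - (c+1)).toNat + 1 ≤ t.length + 1) rfl rfl]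
      simp

-- ===== VERDICT (by name: the statement is the Claim_ definition above) =====
theorem modify_label_string_spec : Claim_equal_modify_label_string := by
  intro string k substring _ hpre
  have hk : 1 ≤ k := hpre
  unfold Spec_modify_label_string
  unfold modify_label_string modify_label_string_alt
  have hA : pvALoop string.toList substring.toList k (string.toList.length + 1) 0 []
      = pvARef (k.toNat - 1) substring.toList string.toList := by
    have := pvALoop_eq string.toList substring.toList k hk
      (string.toList.length + 1) 0 [] (by omega)
    simpa using this
  have hB : pvBRef k substring.toList string.toList 0
      = pvARef (k.toNat - 1) substring.toList string.toList := by
    rw [pvBRef_eq k hk substring.toList string.toList 0 le_rfl (by omega)]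
    simp only [Int.sub_zero]
    by_cases hl : k.toNat ≤ string.toList.length
    · rw [if_pos hl, pvARef_step (by omega : (k.toNat - 1) + 1 ≤ string.toList.length)]
      have : (k.toNat - 1) + 1 = k.toNat := by omega
      rw [this]
      simp [List.append_assoc]
    · rw [if_neg hl, List.append_nil, List.take_of_length_le (by omega),
        pvARef_small (by omega)]
  rw [hA, pvFold_eq, hB]
  simp
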